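-- pv_equiv track=rewrite | github.com/pypi-data/pypi-mirror-390 | packages/quickhooks/quickhooks-0.2.0.tar.gz/quickhooks-0.2.0/hooks/groq_tts_reader.py | _summarize_code_block
-- ===== SOURCE A (Python) =====
-- def _summarize_code_block(lang: str, code: str) -> str:
--     """Create spoken summary of code block"""
--     lines = code.strip().split('\n')
--     line_count = len(lines)
--
--     # Detect code characteristics
--     characteristics = []
--
--     # Language-specific detection
--     if lang.lower() in ['python', 'py']:
--         if any('def ' in line for line in lines):
--             func_count = sum(1 for line in lines if line.strip().startswith('def '))
--             characteristics.append(f"{func_count} function{'s' if func_count > 1 else ''}")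
--         if any('class ' in line for line in lines):
--             class_count = sum(1 for line in lines if line.strip().startswith('class '))
--             characteristics.append(f"{class_count} class{'es' if class_count > 1 else ''}")
--         if any('import ' in line or 'from ' in line for line in lines):
--             characteristics.append("imports")
--
--     elif lang.lower() in ['javascript', 'js', 'typescript', 'ts']:
--         if any('function ' in line or '=>' in line for line in lines):
--             characteristics.append("functions")
--         if any('class ' in line for line in lines):
--             characteristics.append("classes")
--         if any('import ' in line or 'require(' in line for line in lines):
--             characteristics.append("imports")
--
--     elif lang.lower() in ['bash', 'sh', 'shell']:
--         characteristics.append("shell commands")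
--
--     # Build summary
--     summary = f"{lang or 'code'} block with {line_count} lines"
--     if characteristics:
--         summary += f", containing {', '.join(characteristics)}"
--
--     return f"[{summary}]"
-- ===== SOURCE B (Python) =====
-- def _summarize_code_block(lang: str, code: str) -> str:
--     """Create spoken summary of code block (single-pass scan of the lines)."""
--     lines = code.strip().split('\n')
--
--     # One pass: collect every flag/counter any language branch might need.
--     has_def = has_class = fn_like = py_import = js_import = False
--     def_count = class_count = 0
--     for line in lines:
--         stripped = line.strip()
--         if 'def ' in line:
--             has_def = True
--         if stripped.startswith('def '):
--             def_count += 1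
--         if 'class ' in line:
--             has_class = True
--         if stripped.startswith('class '):
--             class_count += 1
--         if 'function ' in line or '=>' in line:
--             fn_like = True
--         if 'import ' in line or 'from ' in line:
--             py_import = True
--         if 'import ' in line or 'require(' in line:
--             js_import = True
--
--     characteristics = []
--     lower = lang.lower()
--     if lower in ('python', 'py'):
--         if has_def:
--             characteristics.append(f"{def_count} function{'s' if def_count > 1 else ''}")
--         if has_class:
--             characteristics.append(f"{class_count} class{'es' if class_count > 1 else ''}")
--         if py_import:
--             characteristics.append("imports")
--     elif lower in ('javascript', 'js', 'typescript', 'ts'):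
--         if fn_like:
--             characteristics.append("functions")
--         if has_class:
--             characteristics.append("classes")
--         if js_import:
--             characteristics.append("imports")
--     elif lower in ('bash', 'sh', 'shell'):
--         characteristics.append("shell commands")
--
--     summary = f"{lang or 'code'} block with {len(lines)} lines"
--     if characteristics:
--         summary += f", containing {', '.join(characteristics)}"
--     return f"[{summary}]"
-- ===== Notes on version B (the rewrite author's own statement) =====
-- stated objective: alternative
-- what changed: A makes up to seven separate passes (any/sum generator expressions) over the lines inside the language branch; B makes one pass over the lines collecting all flags and counters, then branches on the language and assembles the same strings from them.
import Mathlib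
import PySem

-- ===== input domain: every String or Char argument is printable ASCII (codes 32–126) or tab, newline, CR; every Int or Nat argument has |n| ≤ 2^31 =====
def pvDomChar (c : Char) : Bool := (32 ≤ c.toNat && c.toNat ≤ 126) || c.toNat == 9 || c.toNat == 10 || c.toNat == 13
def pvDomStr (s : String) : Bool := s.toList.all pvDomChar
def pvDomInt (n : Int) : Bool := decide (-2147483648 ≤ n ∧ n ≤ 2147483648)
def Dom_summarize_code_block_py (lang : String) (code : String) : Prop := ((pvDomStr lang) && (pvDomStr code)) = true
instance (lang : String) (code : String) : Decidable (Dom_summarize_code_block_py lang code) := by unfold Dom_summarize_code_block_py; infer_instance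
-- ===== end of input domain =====

-- B replaces A's up-to-seven generator-expression passes over the lines by one fold
-- collecting all flags and counters, then assembles the identical summary (objective: alternative).

-- ===== PORT A =====
def summarize_code_block_py (lang : String) (code : String) : String :=
  let lines := (PySem.Str.split? (PySem.Str.strip code) "\n").getD []
  let line_count : Int := lines.length
  let characteristics : List String :=
    if PySem.Str.lower lang == "python" || PySem.Str.lower lang == "py" then
      (if lines.any (fun line => PySem.Str.isIn "def " line) then
        let func_count : Int :=
          (lines.map (fun line => if PySem.Str.startswith (PySem.Str.strip line) "def " then (1 : Int) else 0)).sum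
        [PySem.Int.toStr func_count ++ " function" ++ (if func_count > 1 then "s" else "")]
      else []) ++
      (if lines.any (fun line => PySem.Str.isIn "class " line) then
        let class_count : Int :=
          (lines.map (fun line => if PySem.Str.startswith (PySem.Str.strip line) "class " then (1 : Int) else 0)).sum
        [PySem.Int.toStr class_count ++ " class" ++ (if class_count > 1 then "es" else "")]
      else []) ++
      (if lines.any (fun line => PySem.Str.isIn "import " line || PySem.Str.isIn "from " line) then
        ["imports"] else [])
    else if PySem.Str.lower lang == "javascript" || PySem.Str.lower lang == "js" ||
            PySem.Str.lower lang == "typescript" || PySem.Str.lower lang == "ts" then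
      (if lines.any (fun line => PySem.Str.isIn "function " line || PySem.Str.isIn "=>" line) then
        ["functions"] else []) ++
      (if lines.any (fun line => PySem.Str.isIn "class " line) then ["classes"] else []) ++
      (if lines.any (fun line => PySem.Str.isIn "import " line || PySem.Str.isIn "require(" line) then
        ["imports"] else [])
    else if PySem.Str.lower lang == "bash" || PySem.Str.lower lang == "sh" ||
            PySem.Str.lower lang == "shell" then
      ["shell commands"]
    else []
  let summary := (if lang == "" then "code" else lang) ++ " block with " ++
                 PySem.Int.toStr line_count ++ " lines"
  let summary := if characteristics.isEmpty then summary
                 else summary ++ ", containing " ++ PySem.Str.join ", " characteristics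
  "[" ++ summary ++ "]"

-- ===== PORT B =====
structure PvScan where
  hasDef : Bool
  defCount : Int
  hasClass : Bool
  classCount : Int
  fnLike : Bool
  pyImport : Bool
  jsImport : Bool
deriving DecidableEq, Repr

def pvScanStep (st : PvScan) (line : String) : PvScan :=
  let stripped := PySem.Str.strip line
  { hasDef := st.hasDef || PySem.Str.isIn "def " line
    defCount := st.defCount + (if PySem.Str.startswith stripped "def " then 1 else 0)
    hasClass := st.hasClass || PySem.Str.isIn "class " line
    classCount := st.classCount + (if PySem.Str.startswith stripped "class " then 1 else 0)
    fnLike := st.fnLike || (PySem.Str.isIn "function " line || PySem.Str.isIn "=>" line)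
    pyImport := st.pyImport || (PySem.Str.isIn "import " line || PySem.Str.isIn "from " line)
    jsImport := st.jsImport || (PySem.Str.isIn "import " line || PySem.Str.isIn "require(" line) }

def summarize_code_block_py_alt (lang : String) (code : String) : String :=
  let lines := (PySem.Str.split? (PySem.Str.strip code) "\n").getD []
  let st := lines.foldl pvScanStep ⟨false, 0, false, 0, false, false, false⟩
  let lower := PySem.Str.lower lang
  let characteristics : List String :=
    if lower == "python" || lower == "py" then
      (if st.hasDef then
        [PySem.Int.toStr st.defCount ++ " function" ++ (if st.defCount > 1 then "s" else "")]
      else []) ++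
      (if st.hasClass then
        [PySem.Int.toStr st.classCount ++ " class" ++ (if st.classCount > 1 then "es" else "")]
      else []) ++
      (if st.pyImport then ["imports"] else [])
    else if lower == "javascript" || lower == "js" || lower == "typescript" || lower == "ts" then
      (if st.fnLike then ["functions"] else []) ++
      (if st.hasClass then ["classes"] else []) ++
      (if st.jsImport then ["imports"] else [])
    else if lower == "bash" || lower == "sh" || lower == "shell" then
      ["shell commands"]
    else []
  let summary := (if lang == "" then "code" else lang) ++ " block with " ++
                 PySem.Int.toStr (lines.length : Int) ++ " lines"
  let summary := if characteristics.isEmpty then summary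
                 else summary ++ ", containing " ++ PySem.Str.join ", " characteristics
  "[" ++ summary ++ "]"

-- ===== PRECONDITION & SPEC =====
def Spec_summarize_code_block_py (lang : String) (code : String) (out : String) : Prop := out = summarize_code_block_py_alt lang code
instance (lang : String) (code : String) (out : String) : Decidable (Spec_summarize_code_block_py lang code out) := by unfold Spec_summarize_code_block_py; infer_instance

-- ===== CLAIM (what is proved, stated in full; the proofs are below) =====
def Claim_equal_summarize_code_block_py : Prop := ∀ (lang : String) (code : String), Dom_summarize_code_block_py lang code → Spec_summarize_code_block_py lang code (summarize_code_block_py lang code)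

-- ===== LEMMAS AND PROOFS =====

theorem pvScan_foldl (lines : List String) (st : PvScan) :
    lines.foldl pvScanStep st =
    { hasDef := st.hasDef || lines.any (fun l => PySem.Str.isIn "def " l)
      defCount := st.defCount +
        (lines.countP (fun l => PySem.Str.startswith (PySem.Str.strip l) "def ") : Int)
      hasClass := st.hasClass || lines.any (fun l => PySem.Str.isIn "class " l)
      classCount := st.classCount +
        (lines.countP (fun l => PySem.Str.startswith (PySem.Str.strip l) "class ") : Int)
      fnLike := st.fnLike ||
        lines.any (fun l => PySem.Str.isIn "function " l || PySem.Str.isIn "=>" l)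
      pyImport := st.pyImport ||
        lines.any (fun l => PySem.Str.isIn "import " l || PySem.Str.isIn "from " l)
      jsImport := st.jsImport ||
        lines.any (fun l => PySem.Str.isIn "import " l || PySem.Str.isIn "require(" l) } := by
  induction lines generalizing st with
  | nil => simp
  | cons hd tl ih =>
    simp only [List.foldl_cons, ih, pvScanStep, List.any_cons, List.countP_cons]
    congr 1 <;> first
      | (split_ifs <;> omega)
      | (simp [Bool.or_assoc])

theorem pv_sum_ite_eq_countP (lines : List String) (p : String → Bool) :
    (lines.map (fun l => if p l then (1 : Int) else 0)).sum = (lines.countP p : Int) := by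
  induction lines with
  | nil => simp
  | cons hd tl ih =>
    simp only [List.map_cons, List.sum_cons, ih, List.countP_cons]
    split_ifs <;> omega

-- ===== VERDICT (by name: the statement is the Claim_ definition above) =====
theorem summarize_code_block_py_spec : Claim_equal_summarize_code_block_py := by
  intro lang code _
  unfold Spec_summarize_code_block_py summarize_code_block_py summarize_code_block_py_alt
  simp only [pvScan_foldl, pv_sum_ite_eq_countP, Bool.false_or, zero_add]
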